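-- pv_equiv track=rewrite | github.com/IronVoidForge/FilmCreator | orchestrator/world_registry.py | summarize_character_registry
-- ===== SOURCE A (Python) =====
-- def summarize_character_registry(registry: dict) -> dict[str, list[str]]:
--     canonical_individual_ids: list[str] = []
--     canonical_group_ids: list[str] = []
--     provisional_role_ids: list[str] = []
--     for canonical_id, entry in sorted(registry.items()):
--         kind = entry.get("entity_kind")
--         status = entry.get("status")
--         if status == "provisional":
--             provisional_role_ids.append(canonical_id)
--         elif kind == "group":
--             canonical_group_ids.append(canonical_id)
--         else:
--             canonical_individual_ids.append(canonical_id)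
--     return {
--         "canonical_individual_ids": canonical_individual_ids,
--         "canonical_group_ids": canonical_group_ids,
--         "provisional_role_ids": provisional_role_ids,
--     }
-- ===== SOURCE B (Python) =====
-- def _category(entry):
--     if entry.get("status") == "provisional":
--         return "provisional_role_ids"
--     if entry.get("entity_kind") == "group":
--         return "canonical_group_ids"
--     return "canonical_individual_ids"
--
--
-- def summarize_character_registry(registry: dict) -> dict[str, list[str]]:
--     return {
--         key: sorted(cid for cid, entry in registry.items() if _category(entry) == key)
--         for key in ("canonical_individual_ids", "canonical_group_ids", "provisional_role_ids")
--     }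
-- ===== Notes on version B (the rewrite author's own statement) =====
-- stated objective: alternative
-- what changed: B drops A's global pre-sort and accumulator loop: it builds the result with a dict comprehension that, per category key, filters the unsorted items by a classify helper and sorts each id list independently (valid because dict keys are unique).
import Mathlib
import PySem

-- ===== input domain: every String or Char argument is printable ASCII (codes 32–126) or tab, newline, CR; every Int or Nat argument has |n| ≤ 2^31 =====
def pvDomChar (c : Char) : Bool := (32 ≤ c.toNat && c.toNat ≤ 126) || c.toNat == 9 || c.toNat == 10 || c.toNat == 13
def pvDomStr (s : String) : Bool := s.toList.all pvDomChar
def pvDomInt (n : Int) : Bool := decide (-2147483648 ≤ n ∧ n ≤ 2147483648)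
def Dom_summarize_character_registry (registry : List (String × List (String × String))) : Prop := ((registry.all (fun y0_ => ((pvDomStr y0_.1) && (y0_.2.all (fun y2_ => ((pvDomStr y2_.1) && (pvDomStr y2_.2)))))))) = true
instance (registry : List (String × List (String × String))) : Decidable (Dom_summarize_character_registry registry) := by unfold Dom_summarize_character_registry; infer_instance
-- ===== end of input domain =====

-- B replaces A's global pre-sort + three-accumulator loop by a per-category filter of the
-- unsorted items followed by an independent sort of each id list (objective: alternative).
-- ===== PORT A =====
-- one loop step of A: classify (canonical_id, entry) into the three accumulators
def pvStepA (acc : List String × List String × List String)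
    (p : String × List (String × String)) : List String × List String × List String :=
  let kind := (PySem.Dict.ofList p.2).get? "entity_kind"
  let status := (PySem.Dict.ofList p.2).get? "status"
  if status == some "provisional" then (acc.1, acc.2.1, acc.2.2 ++ [p.1])
  else if kind == some "group" then (acc.1, acc.2.1 ++ [p.1], acc.2.2)
  else (acc.1 ++ [p.1], acc.2.1, acc.2.2)

def summarize_character_registry (registry : List (String × List (String × String))) : List (String × List String) :=
  let r := (PySem.List.sorted (PySem.Dict.ofList registry).items (fun p => p.1) false).foldl pvStepA ([], [], [])
  [("canonical_individual_ids", r.1), ("canonical_group_ids", r.2.1), ("provisional_role_ids", r.2.2)]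

-- ===== PORT B =====
-- B's _category helper
def pvCategory (entry : List (String × String)) : String :=
  if (PySem.Dict.ofList entry).get? "status" == some "provisional" then "provisional_role_ids"
  else if (PySem.Dict.ofList entry).get? "entity_kind" == some "group" then "canonical_group_ids"
  else "canonical_individual_ids"

def summarize_character_registry_alt (registry : List (String × List (String × String))) : List (String × List String) :=
  ["canonical_individual_ids", "canonical_group_ids", "provisional_role_ids"].map
    (fun key => (key,
      PySem.List.sorted
        (((PySem.Dict.ofList registry).items.filter (fun p => pvCategory p.2 == key)).map (fun p => p.1))
        (fun x => x) false))

-- ===== PRECONDITION & SPEC =====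
def Spec_summarize_character_registry (registry : List (String × List (String × String))) (out : List (String × List String)) : Prop := out = summarize_character_registry_alt registry
instance (registry : List (String × List (String × String))) (out : List (String × List String)) : Decidable (Spec_summarize_character_registry registry out) := by unfold Spec_summarize_character_registry; infer_instance

-- ===== CLAIM (what is proved, stated in full; the proofs are below) =====
def Claim_equal_summarize_character_registry : Prop := ∀ (registry : List (String × List (String × String))), Dom_summarize_character_registry registry → Spec_summarize_character_registry registry (summarize_character_registry registry)

-- ===== LEMMAS AND PROOFS =====

-- A's fold over xs computes, per category, the start value with the ids of that category appended
theorem pvFoldA_eq (xs : List (String × List (String × String)))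
    (a b c : List String) :
    xs.foldl pvStepA (a, b, c) =
      (a ++ (xs.filter (fun p => pvCategory p.2 == "canonical_individual_ids")).map (fun p => p.1),
       b ++ (xs.filter (fun p => pvCategory p.2 == "canonical_group_ids")).map (fun p => p.1),
       c ++ (xs.filter (fun p => pvCategory p.2 == "provisional_role_ids")).map (fun p => p.1)) := by
  induction xs generalizing a b c with
  | nil => simp
  | cons x xs ih =>
    by_cases hs : (PySem.Dict.ofList x.2).get? "status" = some "provisional"
    · simp [List.foldl_cons, pvStepA, pvCategory, hs, ih, List.filter_cons, List.append_assoc]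
    · by_cases hk : (PySem.Dict.ofList x.2).get? "entity_kind" = some "group"
      · simp [List.foldl_cons, pvStepA, pvCategory, hs, hk, ih, List.filter_cons, List.append_assoc]
      · simp [List.foldl_cons, pvStepA, pvCategory, hs, hk, ih, List.filter_cons, List.append_assoc]

-- sorting commutes with filtering by a property of the entry and projecting the key
theorem pvSortFilter (L : List (String × List (String × String)))
    (p : String × List (String × String) → Bool) :
    PySem.List.sorted ((L.filter p).map (fun q => q.1)) (fun x => x) false =
      ((PySem.List.sorted L (fun q => q.1) false).filter p).map (fun q => q.1) := by
  apply PySem.List.sorted_id_eq_of_perm_of_pairwise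
  · exact ((PySem.List.sorted_perm L (fun q => q.1) false).filter p).map _
  · have h := PySem.List.sorted_pairwise L (fun q => q.1)
    exact List.pairwise_map.mpr ((h.sublist List.filter_sublist))

-- ===== VERDICT (by name: the statement is the Claim_ definition above) =====
theorem summarize_character_registry_spec : Claim_equal_summarize_character_registry := by
  intro registry _
  unfold Spec_summarize_character_registry summarize_character_registry summarize_character_registry_alt
  simp only [pvFoldA_eq, pvSortFilter, List.map_cons, List.map_nil, List.nil_append]
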